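-- pv_equiv track=rewrite | github.com/spicyjpeg/573in1 | tools/common/util.py | hashData
-- ===== SOURCE A (Python) =====
-- from collections.abc import \
-- 	ByteString, Generator, Iterable, Iterator, Mapping, Sequence
--
-- def hashData(data: Iterable[int]) -> int:
-- 	value: int = 0
--
-- 	for byte in data:
-- 		value = (
-- 			byte +
-- 			((value <<  6) & 0xffffffff) +
-- 			((value << 16) & 0xffffffff) -
-- 			value
-- 		) & 0xffffffff
--
-- 	return value
-- ===== SOURCE B (Python) =====
-- def hashData(data):
--     items = list(data)
--     acc = 0
--     coef = 1
--     for b in reversed(items):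
--         acc += b * coef
--         coef = (coef * 65599) & 0xffffffff
--     return acc & 0xffffffff
-- ===== Notes on version B (the rewrite author's own statement) =====
-- stated objective: alternative
-- what changed: B traverses the bytes back-to-front maintaining an explicit power-of-65599 coefficient and accumulating the polynomial sum, masking once at the end, instead of A's forward Horner fold with shift-and-mask at every step.
import Mathlib
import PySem

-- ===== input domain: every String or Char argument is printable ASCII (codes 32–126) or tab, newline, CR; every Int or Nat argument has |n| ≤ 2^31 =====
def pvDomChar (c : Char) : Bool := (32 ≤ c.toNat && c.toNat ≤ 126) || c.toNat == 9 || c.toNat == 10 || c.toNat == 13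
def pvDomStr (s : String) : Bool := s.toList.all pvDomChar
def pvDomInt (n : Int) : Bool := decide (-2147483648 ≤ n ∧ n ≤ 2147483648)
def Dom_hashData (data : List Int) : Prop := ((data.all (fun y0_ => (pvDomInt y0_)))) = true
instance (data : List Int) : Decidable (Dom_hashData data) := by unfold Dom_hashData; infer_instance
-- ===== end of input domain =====

-- B computes the same 32-bit rolling hash as an explicit weighted polynomial sum over the
-- reversed byte list (coefficient 65599^i maintained incrementally, one final mask),
-- instead of A's forward Horner fold masking at every step.

-- ===== PORT A =====
-- Python's `x & 0xffffffff` on ints is `x mod 2^32` (nonnegative), which is Int.emod here.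
def hashData (data : List Int) : Int :=
  data.foldl (fun value byte =>
    (byte + ((value * 64) % 4294967296) + ((value * 65536) % 4294967296) - value) % 4294967296) 0

-- ===== PORT B =====
def hashData_alt (data : List Int) : Int :=
  let p := data.reverse.foldl
    (fun (p : Int × Int) b => (p.1 + b * p.2, (p.2 * 65599) % 4294967296)) (0, 1)
  p.1 % 4294967296

-- ===== PRECONDITION & SPEC =====
def Spec_hashData (data : List Int) (out : Int) : Prop := out = hashData_alt data
instance (data : List Int) (out : Int) : Decidable (Spec_hashData data out) := by unfold Spec_hashData; infer_instance

-- ===== CLAIM (what is proved, stated in full; the proofs are below) =====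
def Claim_equal_hashData : Prop := ∀ (data : List Int), Dom_hashData data → Spec_hashData data (hashData data)

-- ===== LEMMAS AND PROOFS =====

-- B's foldr form (foldl over the reversed list = foldr)
def pvPairStep (b : Int) (p : Int × Int) : Int × Int :=
  (p.1 + b * p.2, (p.2 * 65599) % 4294967296)

lemma pvAlt_eq_foldr (data : List Int) :
    hashData_alt data = (data.foldr pvPairStep (0, 1)).1 % 4294967296 := by
  simp only [hashData_alt, List.foldl_reverse]
  rfl

-- the second component is the masked power of 65599
lemma pvSnd_pow (l : List Int) :
    (l.foldr pvPairStep (0, 1)).2 = (65599 : Int) ^ l.length % 4294967296 := by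
  induction l with
  | nil => simp

  | cons b t ih =>
    simp only [List.foldr_cons, pvPairStep, ih, List.length_cons]
    rw [Int.mul_emod, Int.emod_emod_of_dvd _ (by norm_num), ← Int.mul_emod, pow_succ]

-- A's per-step update is Horner mod 2^32
lemma pvStepA (v b : Int) :
    (b + ((v * 64) % 4294967296) + ((v * 65536) % 4294967296) - v) % 4294967296
      = (b + v * 65599) % 4294967296 := by
  omega

-- mod-2^32 congruence used in the induction step of pvMain
lemma pvModArith (M a b v K : Int) :
    (a + ((b + v * 65599) % M) * K) % M = (a + b * (K % M) + v * (65599 * K)) % M := by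
  have h0 : Int.ModEq M ((b + v * 65599) % M) (b + v * 65599) := Int.emod_emod_of_dvd _ dvd_rfl
  have h2 : Int.ModEq M (K % M) K := Int.emod_emod_of_dvd _ dvd_rfl
  have e1 : Int.ModEq M (a + ((b + v * 65599) % M) * K) (a + (b + v * 65599) * K) :=
    (h0.mul_right K).add_left a
  have e2 : Int.ModEq M (a + b * (K % M) + v * (65599 * K)) (a + b * K + v * (65599 * K)) :=
    ((h2.mul_left b).add_left a).add_right _
  have e3 : a + (b + v * 65599) * K = a + b * K + v * (65599 * K) := by ring
  exact e1.trans (e3 ▸ e2.symm)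

-- main invariant: A's fold from any masked seed v equals B's accumulated sum plus v·65599^n
lemma pvMain (l : List Int) (v : Int) (hv : 0 ≤ v) (hv2 : v < 4294967296) :
    l.foldl (fun value byte =>
      (byte + ((value * 64) % 4294967296) + ((value * 65536) % 4294967296) - value) % 4294967296) v
    = ((l.foldr pvPairStep (0, 1)).1 + v * (65599 : Int) ^ l.length) % 4294967296 := by
  induction l generalizing v with
  | nil => simpa using (Int.emod_eq_of_lt hv hv2).symm
  | cons b t ih =>
    simp only [List.foldl_cons, List.foldr_cons, pvPairStep, List.length_cons]
    rw [pvStepA, ih _ (Int.emod_nonneg _ (by norm_num)) (Int.emod_lt_of_pos _ (by norm_num)),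
        pvSnd_pow, pvModArith, pow_succ]
    ring_nf

-- ===== VERDICT (by name: the statement is the Claim_ definition above) =====
theorem hashData_spec : Claim_equal_hashData := by
  intro data _
  unfold Spec_hashData hashData
  rw [pvMain data 0 le_rfl (by norm_num), pvAlt_eq_foldr]
  simp
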